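-- pv_equiv track=rewrite | github.com/arkanwolfshade/MythosMUD | server/commands/inventory_item_matching.py | match_prefix_drop
-- ===== SOURCE A (Python) =====
-- def match_prefix_drop(candidates: list[tuple[int, str | None, str | None, str | None]], normalized: str) -> int | None:
--     """Match by prefix: first item_name, then item_id/prototype_id."""
--     for idx, item_name, _item_id, _prototype_id in candidates:
--         if item_name and item_name.lower().startswith(normalized):
--             return idx
--
--     for idx, _item_name, item_id, prototype_id in candidates:
--         for candidate in (item_id, prototype_id):
--             if candidate and candidate.lower().startswith(normalized):
--                 return idx
--     return None
-- ===== SOURCE B (Python) =====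
-- def match_prefix_drop(candidates, normalized):
--     """Single pass: name match returns immediately; first id/prototype match kept as fallback."""
--     fallback = None
--     for idx, item_name, item_id, prototype_id in candidates:
--         if item_name and item_name.lower().startswith(normalized):
--             return idx
--         if fallback is None and (
--             (item_id and item_id.lower().startswith(normalized))
--             or (prototype_id and prototype_id.lower().startswith(normalized))
--         ):
--             fallback = idx
--     return fallback
-- ===== Notes on version B (the rewrite author's own statement) =====
-- stated objective: alternative
-- what changed: Replaced A's two sequential scans (names first, then ids) by a single pass that returns on a name match and keeps the first id/prototype prefix match in a deferred fallback variable.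
import Mathlib
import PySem

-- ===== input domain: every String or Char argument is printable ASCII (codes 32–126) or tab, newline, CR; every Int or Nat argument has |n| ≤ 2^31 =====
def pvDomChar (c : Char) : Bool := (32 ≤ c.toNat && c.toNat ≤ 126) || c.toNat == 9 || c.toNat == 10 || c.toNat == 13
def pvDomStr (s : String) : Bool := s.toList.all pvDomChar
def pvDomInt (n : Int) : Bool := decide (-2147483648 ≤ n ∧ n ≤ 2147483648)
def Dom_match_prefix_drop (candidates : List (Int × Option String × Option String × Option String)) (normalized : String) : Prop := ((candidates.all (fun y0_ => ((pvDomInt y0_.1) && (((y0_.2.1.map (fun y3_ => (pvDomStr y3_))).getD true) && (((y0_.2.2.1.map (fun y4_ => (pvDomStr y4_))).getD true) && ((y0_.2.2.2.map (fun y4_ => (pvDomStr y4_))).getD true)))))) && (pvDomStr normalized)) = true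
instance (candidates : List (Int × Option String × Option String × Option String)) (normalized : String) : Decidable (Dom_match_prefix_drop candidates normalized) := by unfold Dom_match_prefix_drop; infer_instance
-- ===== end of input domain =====

-- B replaces A's two scans by one pass with a deferred fallback (alternative decomposition, same cost).

-- ===== PORT A =====
-- Python truthiness 'candidate and candidate.lower().startswith(normalized)':
-- none or "" is falsy, otherwise the lowercased prefix test.
def pvPrefixHit (o : Option String) (normalized : String) : Bool :=
  match o with
  | none => false
  | some s => !(s = "") && PySem.Str.startswith (PySem.Str.lower s) normalized

-- first loop of A: scan by item_name
def pvScanName (candidates : List (Int × Option String × Option String × Option String)) (normalized : String) : Option Int :=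
  match candidates with
  | [] => none
  | (idx, itemName, _, _) :: rest =>
      if pvPrefixHit itemName normalized then some idx else pvScanName rest normalized

-- second loop of A: scan by item_id then prototype_id
def pvScanIds (candidates : List (Int × Option String × Option String × Option String)) (normalized : String) : Option Int :=
  match candidates with
  | [] => none
  | (idx, _, itemId, protoId) :: rest =>
      if pvPrefixHit itemId normalized then some idx
      else if pvPrefixHit protoId normalized then some idx
      else pvScanIds rest normalized

def match_prefix_drop (candidates : List (Int × Option String × Option String × Option String)) (normalized : String) : Option Int :=
  match pvScanName candidates normalized with
  | some idx => some idx
  | none => pvScanIds candidates normalized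

-- ===== PORT B =====
-- single pass: return on a name match, keep the first id/prototype match as a fallback
def pvOnePass (candidates : List (Int × Option String × Option String × Option String)) (normalized : String) (fallback : Option Int) : Option Int :=
  match candidates with
  | [] => fallback
  | (idx, itemName, itemId, protoId) :: rest =>
      if pvPrefixHit itemName normalized then some idx
      else
        pvOnePass rest normalized
          (if fallback.isNone && (pvPrefixHit itemId normalized || pvPrefixHit protoId normalized)
           then some idx else fallback)

def match_prefix_drop_alt (candidates : List (Int × Option String × Option String × Option String)) (normalized : String) : Option Int :=
  pvOnePass candidates normalized none

-- ===== PRECONDITION & SPEC =====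
def Spec_match_prefix_drop (candidates : List (Int × Option String × Option String × Option String)) (normalized : String) (out : Option Int) : Prop := out = match_prefix_drop_alt candidates normalized
instance (candidates : List (Int × Option String × Option String × Option String)) (normalized : String) (out : Option Int) : Decidable (Spec_match_prefix_drop candidates normalized out) := by unfold Spec_match_prefix_drop; infer_instance

-- ===== CLAIM (what is proved, stated in full; the proofs are below) =====
def Claim_equal_match_prefix_drop : Prop := ∀ (candidates : List (Int × Option String × Option String × Option String)) (normalized : String), Dom_match_prefix_drop candidates normalized → Spec_match_prefix_drop candidates normalized (match_prefix_drop candidates normalized)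

-- ===== LEMMAS AND PROOFS =====
-- invariant of B's single pass: it is A's name scan, with the fallback (if any) taking
-- precedence over A's id scan when no name matches
theorem pvOnePass_eq (candidates : List (Int × Option String × Option String × Option String)) (normalized : String) (fallback : Option Int) :
    pvOnePass candidates normalized fallback =
      match pvScanName candidates normalized with
      | some idx => some idx
      | none =>
          match fallback with
          | some f => some f
          | none => pvScanIds candidates normalized := by
  induction candidates generalizing fallback with
  | nil => cases fallback <;> simp [pvOnePass, pvScanName, pvScanIds]
  | cons hd rest ih =>
      obtain ⟨idx, itemName, itemId, protoId⟩ := hd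
      simp only [pvOnePass, pvScanName, pvScanIds]
      by_cases hn : pvPrefixHit itemName normalized
      · simp [hn]
      · simp only [hn]
        rw [ih]
        cases fallback with
        | some f => simp
        | none =>
            by_cases h1 : pvPrefixHit itemId normalized
            · simp [h1]
            · by_cases h2 : pvPrefixHit protoId normalized <;> simp [h1, h2]

-- ===== VERDICT (by name: the statement is the Claim_ definition above) =====
theorem match_prefix_drop_spec : Claim_equal_match_prefix_drop := by
  intro candidates normalized _
  unfold Spec_match_prefix_drop match_prefix_drop match_prefix_drop_alt
  rw [pvOnePass_eq]
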